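-- pv_equiv track=rewrite | github.com/rnabioco/rnaedits | src/filter_reads.py | check_repeats
-- ===== SOURCE A (Python) =====
-- def check_repeats(seq, repeats, num_repeats = 10):
--
--     """ check for repeat but exclude single nucleotide repeats """
--
--     for test_pattern in repeats:
--         if len(test_pattern) is 1:
--             continue
--
--         test_pattern_rpt = test_pattern * num_repeats
--
--         if test_pattern_rpt in seq:
--             return False
--
--     return True
-- ===== SOURCE B (Python) =====
-- import re
--
-- def check_repeats(seq, repeats, num_repeats=10):
--     """check for repeat but exclude single nucleotide repeats (one combined regex scan)"""
--     motifs = [re.escape(p) * num_repeats for p in repeats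
--               if len(p) != 1 and len(p) * num_repeats <= len(seq)]
--     if not motifs:
--         return True
--     return re.search('|'.join(motifs), seq) is None
-- ===== Notes on version B (the rewrite author's own statement) =====
-- stated objective: idiomatic
-- what changed: A runs one substring search over seq per multi-char pattern; B collects the escaped repeated motifs once (skipping motifs longer than seq, which cannot occur), joins them into a single alternation regex and decides the answer with one re.search scan, returning True immediately when no motifs remain.
import Mathlib
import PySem

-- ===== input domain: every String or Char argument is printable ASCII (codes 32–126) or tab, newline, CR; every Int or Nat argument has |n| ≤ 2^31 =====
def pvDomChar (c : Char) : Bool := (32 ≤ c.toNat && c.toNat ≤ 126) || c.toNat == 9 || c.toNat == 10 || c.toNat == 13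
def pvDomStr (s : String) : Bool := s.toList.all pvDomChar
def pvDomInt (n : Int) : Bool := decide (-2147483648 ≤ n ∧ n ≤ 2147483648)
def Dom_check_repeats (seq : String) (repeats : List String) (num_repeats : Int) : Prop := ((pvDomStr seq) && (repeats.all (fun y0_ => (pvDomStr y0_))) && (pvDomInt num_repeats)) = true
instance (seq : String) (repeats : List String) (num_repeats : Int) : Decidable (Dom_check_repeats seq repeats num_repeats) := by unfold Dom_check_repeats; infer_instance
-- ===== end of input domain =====

-- B replaces A's per-pattern substring searches by one combined alternation-regex scan over the sequence (idiomatic, same cost class).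


-- ===== PORT A =====
-- the 'for test_pattern in repeats' loop with its continue / early return
def pvGoA (seq : List Char) (n : Int) : List String → Bool
  | [] => true
  | p :: rest =>
    if PySem.Str.len p == 1 then pvGoA seq n rest
    else if PySem.Chars.isIn (PySem.List.pyRepeat p.toList n) seq then false
    else pvGoA seq n rest

def check_repeats (seq : String) (repeats : List String) (num_repeats : Int) : Bool :=
  pvGoA seq.toList num_repeats repeats

-- ===== PORT B =====
-- motifs = [re.escape(p) * num_repeats for p in repeats if len(p) != 1 and fits]; re.escape only
-- backslash-protects metacharacters, so the alternation '|'.join(motifs) is a regex of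
-- literal alternatives, and `re.search(...) is None` holds exactly when no motif
-- p * num_repeats occurs as a substring of seq — ported exactly as that search.
def check_repeats_alt (seq : String) (repeats : List String) (num_repeats : Int) : Bool :=
  let motifs := (repeats.filter (fun p =>
      !(PySem.Str.len p == 1) && decide (PySem.Str.len p * num_repeats ≤ PySem.Str.len seq))).map
      (fun p => PySem.List.pyRepeat p.toList num_repeats)
  if motifs.isEmpty then true
  else !(motifs.any (fun m => PySem.Chars.isIn m seq.toList))

-- ===== PRECONDITION & SPEC =====
def Spec_check_repeats (seq : String) (repeats : List String) (num_repeats : Int) (out : Bool) : Prop := out = check_repeats_alt seq repeats num_repeats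
instance (seq : String) (repeats : List String) (num_repeats : Int) (out : Bool) : Decidable (Spec_check_repeats seq repeats num_repeats out) := by unfold Spec_check_repeats; infer_instance

-- ===== CLAIM =====
def Claim_equal_check_repeats : Prop := ∀ (seq : String) (repeats : List String) (num_repeats : Int), Dom_check_repeats seq repeats num_repeats → Spec_check_repeats seq repeats num_repeats (check_repeats seq repeats num_repeats)

-- ===== LEMMAS AND PROOFS =====

-- A's loop returns true iff no multi-char motif is a substring of seq
theorem pvGoA_eq_all (seq : List Char) (n : Int) (rs : List String) :
    pvGoA seq n rs =
      ((rs.filter (fun p => !(PySem.Str.len p == 1))).map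
        (fun p => PySem.List.pyRepeat p.toList n)).all
        (fun m => !(PySem.Chars.isIn m seq)) := by
  induction rs with
  | nil => rfl
  | cons p rest ih =>
    by_cases h : p.length = 1
    · simp [pvGoA, h, ih]
    · by_cases h2 : PySem.Chars.isIn (PySem.List.pyRepeat p.toList n) seq
      · simp [pvGoA, h, h2]
      · simp [pvGoA, h, h2, ih]

theorem pv_pyRepeat_length {α : Type} (p : List α) (n : Int) :
    (PySem.List.pyRepeat p n).length = n.toNat * p.length := by
  unfold PySem.List.pyRepeat
  induction n.toNat with
  | zero => simp
  | succ k ih => simp [List.replicate_succ, ih, Nat.succ_mul, Nat.add_comm]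

-- a motif longer than seq cannot occur in it
theorem pv_too_long_not_in (seq : String) (p : String) (n : Int)
    (h : ¬ PySem.Str.len p * n ≤ PySem.Str.len seq) :
    PySem.Chars.isIn (PySem.List.pyRepeat p.toList n) seq.toList = false := by
  rw [Bool.eq_false_iff]
  intro ht
  have hinf := (PySem.Chars.isIn_iff_infix _ _).1 ht
  have hlen := hinf.length_le
  rw [pv_pyRepeat_length] at hlen
  simp only [PySem.Str.len_eq] at h
  have hn : 0 < n := by
    by_contra hn0
    exact h (by nlinarith [Int.natCast_nonneg p.length, Int.natCast_nonneg seq.length])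
  have h1 : (n.toNat : Int) = n := Int.toNat_of_nonneg hn.le
  have h2 : (seq.toList.length : Int) = (seq.length : Int) := by simp
  have h3 : (p.toList.length : Int) = (p.length : Int) := by simp
  apply h
  calc (p.length : Int) * n = ((n.toNat * p.toList.length : Nat) : Int) := by
        push_cast [h3, h1]; ring
    _ ≤ ((seq.toList.length : Nat) : Int) := by exact_mod_cast hlen
    _ = (seq.length : Int) := h2

theorem check_repeats_eq (seq : String) (repeats : List String) (num_repeats : Int) :
    check_repeats seq repeats num_repeats = check_repeats_alt seq repeats num_repeats := by
  unfold check_repeats check_repeats_alt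
  rw [pvGoA_eq_all]
  have hmain : ((repeats.filter (fun p => !(PySem.Str.len p == 1))).map
        (fun p => PySem.List.pyRepeat p.toList num_repeats)).all
        (fun m => !(PySem.Chars.isIn m seq.toList)) =
      ((repeats.filter (fun p =>
          !(PySem.Str.len p == 1) && decide (PySem.Str.len p * num_repeats ≤ PySem.Str.len seq))).map
        (fun p => PySem.List.pyRepeat p.toList num_repeats)).all
        (fun m => !(PySem.Chars.isIn m seq.toList)) := by
    rw [Bool.eq_iff_iff]
    simp only [List.all_eq_true, List.mem_map, List.mem_filter, Bool.not_eq_eq_eq_not,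
      Bool.not_true, Bool.and_eq_true, decide_eq_true_eq]
    constructor
    · rintro h m ⟨p, ⟨hp, hlen, _⟩, rfl⟩
      exact h _ ⟨p, ⟨hp, hlen⟩, rfl⟩
    · rintro h m ⟨p, ⟨hp, hlen⟩, rfl⟩
      by_cases hfit : PySem.Str.len p * num_repeats ≤ PySem.Str.len seq
      · exact h _ ⟨p, ⟨hp, hlen, hfit⟩, rfl⟩
      · rw [pv_too_long_not_in seq p num_repeats hfit]
  rw [hmain]
  show _ = if _ then _ else _
  split_ifs with he
  · simp_all [List.isEmpty_iff]
    intro x hx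
    by_cases h1 : x.length = 1
    · exact Or.inl (Or.inl h1)
    · refine Or.inr (pv_too_long_not_in seq x num_repeats ?_)
      simp only [PySem.Str.len_eq]
      exact not_le.2 (he x hx h1)
  · simp [List.all_eq_not_any_not]

-- ===== VERDICT =====
theorem check_repeats_spec : Claim_equal_check_repeats := by
  intro seq repeats num_repeats _
  exact check_repeats_eq seq repeats num_repeats
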